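-- pv_equiv track=rewrite | github.com/hayrdenhald/public_notes | inline_code_to_html.py | inline_code_indices
-- ===== SOURCE A (Python) =====
-- from typing import List, Tuple
--
-- def is_inline_code_symbol(char: str) -> bool:
--     return char == '`'
--
-- def inline_code_indices(text: str) -> Tuple[bool, List[int]]:
--     result = []
--     gather = ()
--     inside_code_block = False
--     for idx, char in enumerate(text):
--         if is_inline_code_symbol(char):
--             if inside_code_block:
--                 inside_code_block = False
--                 gather = (gather[0], idx)
--                 result.append(gather)
--                 gather = ()
--             else:
--                 gather = (idx, 0)
--                 inside_code_block = True
--     return result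
-- ===== SOURCE B (Python) =====
-- def _pairs(xs):
--     if len(xs) < 2:
--         return []
--     return [(xs[0], xs[1])] + _pairs(xs[2:])
--
-- def inline_code_indices(text):
--     pos = [i for i, c in enumerate(text) if c == '`']
--     return _pairs(pos)
-- ===== Notes on version B (the rewrite author's own statement) =====
-- stated objective: simpler
-- what changed: Replaces the stateful flag-and-gather character loop with a two-step decomposition: one comprehension collecting all backtick positions, then pairing consecutive positions recursively.
import Mathlib
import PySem

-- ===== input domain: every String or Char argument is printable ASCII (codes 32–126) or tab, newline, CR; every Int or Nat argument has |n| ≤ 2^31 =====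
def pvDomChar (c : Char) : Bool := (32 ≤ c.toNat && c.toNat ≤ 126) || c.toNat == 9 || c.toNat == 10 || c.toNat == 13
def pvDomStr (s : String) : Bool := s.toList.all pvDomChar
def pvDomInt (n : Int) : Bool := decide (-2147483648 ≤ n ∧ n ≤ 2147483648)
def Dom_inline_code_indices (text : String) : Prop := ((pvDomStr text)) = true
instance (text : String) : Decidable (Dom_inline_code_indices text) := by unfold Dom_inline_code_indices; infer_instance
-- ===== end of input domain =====

-- B replaces A's stateful flag-and-gather scan with: collect all backtick positions, then pair them up (simpler decomposition, same cost).

-- ===== PORT A =====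
def is_inline_code_symbol (char : Char) : Bool := char == '`'

-- A's loop state: accumulated result, 'gather' pair (Python's initial empty tuple modelled
-- as (0, 0); it is never read while inside_code_block is false), inside_code_block flag.
def pvLoopA : List (Int × Char) → List (Int × Int) → (Int × Int) → Bool → List (Int × Int)
  | [], result, _, _ => result
  | (idx, char) :: rest, result, gather, inside_code_block =>
    if is_inline_code_symbol char then
      if inside_code_block then
        pvLoopA rest (result ++ [(gather.1, idx)]) (0, 0) false
      else
        pvLoopA rest result (idx, 0) true
    else
      pvLoopA rest result gather inside_code_block

def inline_code_indices (text : String) : List (Int × Int) :=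
  pvLoopA (PySem.List.enumerate text.toList 0) [] (0, 0) false

-- ===== PORT B =====
def pvPairs : List Int → List (Int × Int)
  | a :: b :: rest => ((a, b)) :: pvPairs rest
  | _ => []

def inline_code_indices_alt (text : String) : List (Int × Int) :=
  pvPairs (((PySem.List.enumerate text.toList 0).filter (fun p => p.2 == '`')).map (·.1))

-- ===== PRECONDITION & SPEC =====
def Spec_inline_code_indices (text : String) (out : List (Int × Int)) : Prop := out = inline_code_indices_alt text
instance (text : String) (out : List (Int × Int)) : Decidable (Spec_inline_code_indices text out) := by unfold Spec_inline_code_indices; infer_instance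

-- ===== CLAIM (what is proved, stated in full; the proofs are below) =====
def Claim_equal_inline_code_indices : Prop := ∀ (text : String), Dom_inline_code_indices text → Spec_inline_code_indices text (inline_code_indices text)

-- ===== LEMMAS AND PROOFS =====

-- The backtick positions of an enumerated suffix.
def pvPos (l : List (Int × Char)) : List Int :=
  (l.filter (fun p => p.2 == '`')).map (·.1)

lemma pvLoopA_inv (l : List (Int × Char)) :
    (∀ res o z, pvLoopA l res (o, z) true = res ++ pvPairs (o :: pvPos l)) ∧
    (∀ res g, pvLoopA l res g false = res ++ pvPairs (pvPos l)) := by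
  induction l with
  | nil => simp [pvLoopA, pvPos, pvPairs]
  | cons hd tl ih =>
    obtain ⟨iht, ihf⟩ := ih
    obtain ⟨i, c⟩ := hd
    by_cases hc : c = '`'
    · constructor
      · intro res o z
        simp [pvLoopA, is_inline_code_symbol, hc, pvPos, pvPairs, ihf]
      · intro res g
        simp [pvLoopA, is_inline_code_symbol, hc, pvPos, iht]
    · constructor
      · intro res o z
        simp [pvLoopA, is_inline_code_symbol, hc, pvPos, iht]
      · intro res g
        simp [pvLoopA, is_inline_code_symbol, hc, pvPos, ihf]

-- ===== VERDICT (by name: the statement is the Claim_ definition above) =====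
theorem inline_code_indices_spec : Claim_equal_inline_code_indices := by
  intro text _
  unfold Spec_inline_code_indices inline_code_indices inline_code_indices_alt
  rw [(pvLoopA_inv (PySem.List.enumerate text.toList 0)).2]
  simp [pvPos]
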